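-- pv_equiv track=rewrite | github.com/harrywright/AdventOfCode | 2019/Day04/day_04.py | contains_only_double_digit
-- ===== SOURCE A (Python) =====
-- def contains_only_double_digit(password: int) -> bool:
--     """Contains a double that is not part of a longer sequence"""
--     word = str(password)
--
--     if word[0] == word[1] and word[0] != word[2]:
--         return True
--     if word[-2] == word[-1] and word[-2] != word[-3]:
--         return True
--
--     for i in range(1, len(word)-2):
--         if word[i] == word[i+1] and word[i] != word[i+2] and word[i] != word[i-1]:
--             return True
--
--     return False
-- ===== SOURCE B (Python) =====
-- def contains_only_double_digit(password: int) -> bool: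
--     """Contains a double that is not part of a longer sequence"""
--     return _has_isolated_double(str(password))
--
--
-- def _has_isolated_double(word: str) -> bool:
--     """Strip one maximal run of equal characters at a time; succeed on a run of length 2."""
--     if word == "":
--         return False
--     run = 1
--     while run < len(word) and word[run] == word[0]:
--         run += 1
--     return run == 2 or _has_isolated_double(word[run:])
-- ===== Notes on version B (the rewrite author's own statement) =====
-- stated objective: alternative
-- what changed: Replaces A's index-based head/tail/middle special-case scan with a recursive pass that strips one maximal run of equal characters at a time and succeeds iff some maximal run has length exactly 2.
-- outside the precondition, e.g. on contains_only_double_digit(11): A raises IndexError, B returns True; on contains_only_double_digit(22): A raises IndexError, B returns True; on contains_only_double_digit(99): A raises IndexError, B returns True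
import Mathlib
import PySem

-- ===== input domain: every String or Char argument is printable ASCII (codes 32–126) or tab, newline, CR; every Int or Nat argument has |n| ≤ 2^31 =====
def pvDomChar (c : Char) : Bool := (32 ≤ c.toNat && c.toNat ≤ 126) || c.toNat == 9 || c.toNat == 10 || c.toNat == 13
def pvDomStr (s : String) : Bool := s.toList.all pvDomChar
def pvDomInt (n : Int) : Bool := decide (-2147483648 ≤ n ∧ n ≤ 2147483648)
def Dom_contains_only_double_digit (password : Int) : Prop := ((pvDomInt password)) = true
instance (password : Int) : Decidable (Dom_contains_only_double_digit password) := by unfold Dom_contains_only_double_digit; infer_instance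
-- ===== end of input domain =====

-- B replaces A's index-based head/tail/middle special-casing with a recursive pass that strips one
-- maximal run of equal characters at a time and succeeds iff some maximal run has length exactly 2
-- (alternative decomposition, same cost).


-- ===== PORT A =====
-- word[i] is ported with pyGetD (total form); under Pre_ every index Python actually evaluates
-- (short-circuit `and`) is in range, so the defaults are never the result.
def pvACore (word : List Char) : Bool :=
  if (PySem.List.pyGetD word 0 ' ' == PySem.List.pyGetD word 1 ' ') &&
     (PySem.List.pyGetD word 0 ' ' != PySem.List.pyGetD word 2 ' ') then true
  else if (PySem.List.pyGetD word (-2) ' ' == PySem.List.pyGetD word (-1) ' ') &&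
          (PySem.List.pyGetD word (-2) ' ' != PySem.List.pyGetD word (-3) ' ') then true
  else
    (PySem.List.pyRange 1 (PySem.List.len word - 2) 1).any (fun i =>
      (PySem.List.pyGetD word i ' ' == PySem.List.pyGetD word (i+1) ' ') &&
      (PySem.List.pyGetD word i ' ' != PySem.List.pyGetD word (i+2) ' ') &&
      (PySem.List.pyGetD word i ' ' != PySem.List.pyGetD word (i-1) ' '))

def contains_only_double_digit (password : Int) : Bool :=
  pvACore (PySem.Int.toChars password)

-- ===== PORT B =====
-- the `while run < len(word) and word[run] == word[0]` scan of Source B: length of the run of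
-- characters equal to word[0] at the front of the tail
def pvRunLen (c : Char) : List Char → Nat
  | [] => 0
  | x :: t => if x == c then pvRunLen c t + 1 else 0

-- _has_isolated_double of Source B: word = c :: t, run = pvRunLen c t + 1, word[run:] = t.drop (run - 1).
-- The Nat argument is fuel (initially the length, enough for every recursive call): it only makes
-- the same recursion structural, so the kernel can evaluate it.
def pvGo : Nat → List Char → Bool
  | _, [] => false
  | 0, _ :: _ => false  -- unreachable: fuel starts at the length and dominates it at every call
  | fuel + 1, c :: t =>
      let run := pvRunLen c t + 1
      (run == 2) || pvGo fuel (t.drop (run - 1))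

def pvHasIsolatedDouble (word : List Char) : Bool := pvGo word.length word

def contains_only_double_digit_alt (password : Int) : Bool :=
  pvHasIsolatedDouble (PySem.Int.toChars password)

-- ===== PRECONDITION & SPEC =====
-- Pre_ excludes exactly the inputs where A raises IndexError: one-digit passwords 0..9
-- (word[1] out of range) and two-equal-digit passwords 11,22,...,99 (word[2] out of range).
def Pre_contains_only_double_digit (password : Int) : Prop :=
  3 ≤ (PySem.Int.toChars password).length ∨
  ((PySem.Int.toChars password).length = 2 ∧
   (PySem.Int.toChars password).getD 0 ' ' ≠ (PySem.Int.toChars password).getD 1 ' ')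
instance (password : Int) : Decidable (Pre_contains_only_double_digit password) := by
  unfold Pre_contains_only_double_digit; infer_instance

def pvWitness_contains_only_double_digit : Int := 123

def Spec_contains_only_double_digit (password : Int) (out : Bool) : Prop := out = contains_only_double_digit_alt password
instance (password : Int) (out : Bool) : Decidable (Spec_contains_only_double_digit password out) := by unfold Spec_contains_only_double_digit; infer_instance

-- ===== CLAIM (what is proved, stated in full; the proofs are below) =====
def Claim_equal_contains_only_double_digit : Prop := ∀ (password : Int), Dom_contains_only_double_digit password → Pre_contains_only_double_digit password → Spec_contains_only_double_digit password (contains_only_double_digit password)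


-- ===== LEMMAS AND PROOFS =====

theorem pvRunLen_le (c : Char) (t : List Char) : pvRunLen c t ≤ t.length := by
  induction t with
  | nil => simp [pvRunLen]
  | cons x t ih => simp only [pvRunLen, List.length_cons]; split <;> omega

-- "word has an isolated double at position i": the common specification both ports are reduced to.
def pvIso (w : List Char) (i : Nat) : Prop :=
  i + 2 ≤ w.length ∧ w.getD i ' ' = w.getD (i+1) ' ' ∧
  (i = 0 ∨ w.getD (i-1) ' ' ≠ w.getD i ' ') ∧
  (i + 2 = w.length ∨ w.getD (i+2) ' ' ≠ w.getD i ' ')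

theorem pvRunLen_run (c : Char) (t : List Char) :
    ∀ k, k < pvRunLen c t → t.getD k ' ' = c := by
  induction t with
  | nil => simp [pvRunLen]
  | cons x t ih =>
    intro k hk
    simp only [pvRunLen] at hk
    by_cases hx : x = c
    · simp [hx] at hk
      cases k with
      | zero => simp [hx]
      | succ k => simpa using ih k (by omega)
    · simp [hx] at hk

theorem pvRunLen_stop (c : Char) (t : List Char) (h : pvRunLen c t < t.length) :
    t.getD (pvRunLen c t) ' ' ≠ c := by
  induction t with
  | nil => simp at h
  | cons x t ih =>
    simp only [pvRunLen] at *
    by_cases hx : x = c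
    · simp only [hx, beq_self_eq_true, if_true] at *
      simpa using ih (by simpa using h)
    · simp [hx]

theorem pv_getD_drop (t : List Char) (r j : Nat) :
    (t.drop r).getD j ' ' = t.getD (r + j) ' ' := by
  simp [List.getD_eq_getElem?_getD, List.getElem?_drop]

-- index shift: an isolated double strictly after the first maximal run of c :: t
-- is an isolated double of the rest, and conversely
theorem pvIso_shift (c : Char) (t : List Char) (j : Nat) :
    pvIso (c :: t) (pvRunLen c t + 1 + j) ↔ pvIso (t.drop (pvRunLen c t)) j := by
  have hr := pvRunLen_le c t
  have hrun := pvRunLen_run c t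
  have hstop := pvRunLen_stop c t
  set r := pvRunLen c t with hrdef
  have hg : ∀ m : Nat, (c :: t).getD (m + 1) ' ' = t.getD m ' ' := by intro m; simp
  have hc : ∀ m : Nat, m ≤ r → (c :: t).getD m ' ' = c := by
    intro m hm
    cases m with
    | zero => simp
    | succ m => rw [hg]; exact hrun m (by omega)
  unfold pvIso
  rw [List.length_cons, List.length_drop,
      show r + 1 + j = (r + j) + 1 from by omega, hg,
      show r + j + 1 + 1 = (r + j + 1) + 1 from by omega, hg,
      show r + j + 1 + 2 = (r + j + 2) + 1 from by omega, hg,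
      show r + j + 1 - 1 = r + j from by omega,
      pv_getD_drop, pv_getD_drop, pv_getD_drop, pv_getD_drop,
      show r + (j + 1) = r + j + 1 from by omega,
      show r + (j + 2) = r + j + 2 from by omega]
  constructor
  · rintro ⟨h1, h2, h3, h4⟩
    refine ⟨by omega, h2, ?_, ?_⟩
    · cases j with
      | zero => exact Or.inl rfl
      | succ j' =>
        rcases h3 with h | h
        · omega
        · refine Or.inr ?_
          rw [show r + (j' + 1 - 1) = r + j' from by omega]
          rw [show r + (j' + 1) = (r + j') + 1 from by omega, hg] at h
          exact h
    · rcases h4 with h | h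
      · exact Or.inl (by omega)
      · exact Or.inr h
  · rintro ⟨h1, h2, h3, h4⟩
    refine ⟨by omega, h2, ?_, ?_⟩
    · refine Or.inr ?_
      cases j with
      | zero =>
        rw [show r + 0 = r from rfl, hc r le_rfl]
        have := hstop (by omega)
        simpa using fun h => this h.symm
      | succ j' =>
        rcases h3 with h | h
        · omega
        · rw [show r + (j' + 1) = (r + j') + 1 from by omega, hg]
          rw [show r + (j' + 1 - 1) = r + j' from by omega] at h
          exact h
    · rcases h4 with h | h
      · exact Or.inl (by omega)
      · exact Or.inr h

-- splitting off the first maximal run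
theorem pvIso_cons_iff (c : Char) (t : List Char) :
    (∃ i, pvIso (c :: t) i) ↔ pvRunLen c t = 1 ∨ ∃ j, pvIso (t.drop (pvRunLen c t)) j := by
  have hr := pvRunLen_le c t
  have hrun := pvRunLen_run c t
  have hstop := pvRunLen_stop c t
  set r := pvRunLen c t with hrdef
  have hg : ∀ m : Nat, (c :: t).getD (m + 1) ' ' = t.getD m ' ' := by intro m; simp
  have hc : ∀ m : Nat, m ≤ r → (c :: t).getD m ' ' = c := by
    intro m hm
    cases m with
    | zero => simp
    | succ m => rw [hg]; exact hrun m (by omega)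
  constructor
  · rintro ⟨i, hiso⟩
    by_cases hi : r + 1 ≤ i
    · refine Or.inr ⟨i - (r + 1), (pvIso_shift c t _).mp ?_⟩
      rw [show r + 1 + (i - (r + 1)) = i from by omega]
      exact hiso
    · left
      obtain ⟨h1, h2, h3, h4⟩ := hiso
      rw [List.length_cons] at h1 h4
      have hi0 : i = 0 := by
        by_contra h0
        rcases h3 with h | h
        · exact h0 h
        · exact h (by rw [hc (i - 1) (by omega), hc i (by omega)])
      subst hi0
      have hpair : t.getD 0 ' ' = c := by
        have := h2
        rw [show (0 : Nat) + 1 = 1 from rfl, show (1 : Nat) = 0 + 1 from rfl, hg] at this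
        simpa using this.symm
      have hrpos : 1 ≤ r := by
        by_contra h0
        exact hstop (by omega) (by rwa [show r = 0 from by omega])
      rcases h4 with h | h
      · omega
      · have hne : t.getD 1 ' ' ≠ c := by
          rw [show (0 : Nat) + 2 = 1 + 1 from rfl, hg] at h
          simpa using h
        have : ¬ (1 < r) := fun hlt => hne (hrun 1 hlt)
        omega
  · rintro (h | ⟨j, hj⟩)
    · refine ⟨0, ?_, ?_, Or.inl rfl, ?_⟩
      · rw [List.length_cons]; omega
      · rw [show (0 : Nat) + 1 = 0 + 1 from rfl, hg, hrun 0 (by omega)]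
        simp
      · by_cases hlen : t.length = 1
        · exact Or.inl (by rw [List.length_cons]; omega)
        · refine Or.inr ?_
          rw [show (0 : Nat) + 2 = 1 + 1 from rfl, hg]
          have := hstop (by omega)
          rw [h] at this
          simpa using this
    · exact ⟨r + 1 + j, (pvIso_shift c t j).mpr hj⟩

theorem pvGo_iff (fuel : Nat) (w : List Char) (h : w.length ≤ fuel) :
    pvGo fuel w = true ↔ ∃ i, pvIso w i := by
  induction fuel generalizing w with
  | zero =>
    match w, h with
    | [], _ =>
      exact iff_of_false (by simp [pvGo]) (by rintro ⟨i, hlen, -⟩; simp at hlen)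
  | succ fuel ih =>
    match w with
    | [] =>
      exact iff_of_false (by simp [pvGo]) (by rintro ⟨i, hlen, -⟩; simp at hlen)
    | c :: t =>
      simp only [pvGo, Nat.add_sub_cancel, Bool.or_eq_true, beq_iff_eq]
      rw [ih (t.drop (pvRunLen c t)) (by simp at h ⊢; omega), pvIso_cons_iff]
      constructor
      · rintro (h1 | h1)
        · exact Or.inl (by omega)
        · exact Or.inr h1
      · rintro (h1 | h1)
        · exact Or.inl (by omega)
        · exact Or.inr h1

theorem pvHasIso_iff (w : List Char) : pvHasIsolatedDouble w = true ↔ ∃ i, pvIso w i :=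
  pvGo_iff w.length w le_rfl

theorem pvACore_iff (w : List Char)
    (h2 : 2 ≤ w.length) (hne : w.length = 2 → w.getD 0 ' ' ≠ w.getD 1 ' ') :
    pvACore w = true ↔ ∃ i, pvIso w i := by
  by_cases h3 : 3 ≤ w.length
  · have g0 : PySem.List.pyGetD w 0 ' ' = w.getD 0 ' ' := PySem.List.pyGetD_zero w ' '
    have g1 : PySem.List.pyGetD w 1 ' ' = w.getD 1 ' ' := PySem.List.pyGetD_ofNat' w 1 ' '
    have g2 : PySem.List.pyGetD w 2 ' ' = w.getD 2 ' ' := PySem.List.pyGetD_ofNat' w 2 ' '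
    have gm1 : PySem.List.pyGetD w (-1) ' ' = w.getD (w.length - 1) ' ' := by
      rw [PySem.List.pyGetD_neg_ofNat w 1 ' ' (by omega) (by omega),
          List.getD_eq_getElem _ _ (by omega)]
    have gm2 : PySem.List.pyGetD w (-2) ' ' = w.getD (w.length - 2) ' ' := by
      rw [PySem.List.pyGetD_neg_ofNat w 2 ' ' (by omega) (by omega),
          List.getD_eq_getElem _ _ (by omega)]
    have gm3 : PySem.List.pyGetD w (-3) ' ' = w.getD (w.length - 3) ' ' := by
      rw [PySem.List.pyGetD_neg_ofNat w 3 ' ' (by omega) (by omega),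
          List.getD_eq_getElem _ _ (by omega)]
    have gi : ∀ i : Int, 0 ≤ i → i < w.length → PySem.List.pyGetD w i ' ' = w.getD i.toNat ' ' := by
      intro i h0 hi
      rw [PySem.List.pyGetD_eq_getElem w ' ' h0 (by exact_mod_cast hi),
          List.getD_eq_getElem _ _ (by omega)]
    unfold pvACore
    rw [g0, g1, g2, gm1, gm2, gm3]
    split_ifs with hA hB
    · rw [Bool.and_eq_true, beq_iff_eq, bne_iff_ne] at hA
      refine iff_of_true rfl ⟨0, by omega, hA.1, Or.inl rfl, Or.inr ?_⟩
      exact fun h => hA.2 h.symm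
    · rw [Bool.and_eq_true, beq_iff_eq, bne_iff_ne] at hB
      refine iff_of_true rfl ⟨w.length - 2, by omega, ?_, Or.inr ?_, Or.inl (by omega)⟩
      · rw [show w.length - 2 + 1 = w.length - 1 from by omega]; exact hB.1
      · rw [show w.length - 2 - 1 = w.length - 3 from by omega]
        exact fun h => hB.2 (h.symm)
    · rw [List.any_eq_true]
      constructor
      · rintro ⟨i, hmem, hf⟩
        rw [PySem.List.mem_pyRange_one] at hmem
        simp only [PySem.List.len_eq] at hmem
        obtain ⟨hi1, hi2⟩ := hmem
        rw [gi i (by omega) (by omega), gi (i+1) (by omega) (by omega),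
            gi (i+2) (by omega) (by omega), gi (i-1) (by omega) (by omega)] at hf
        rw [Bool.and_eq_true, Bool.and_eq_true, beq_iff_eq, bne_iff_ne, bne_iff_ne] at hf
        obtain ⟨⟨hpair, hr⟩, hl⟩ := hf
        refine ⟨i.toNat, by omega, ?_, Or.inr ?_, Or.inr ?_⟩
        · rw [show i.toNat + 1 = (i+1).toNat from by omega]; exact hpair
        · rw [show i.toNat - 1 = (i-1).toNat from by omega]
          exact fun h => hl h.symm
        · rw [show i.toNat + 2 = (i+2).toNat from by omega]
          exact fun h => hr h.symm
      · rintro ⟨i, hlen', hpair, hleft, hright⟩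
        have hi0 : i ≠ 0 := by
          rintro rfl
          rcases hright with h | h
          · omega
          · exact hA (by rw [Bool.and_eq_true, beq_iff_eq, bne_iff_ne]
                         exact ⟨hpair, fun hh => h hh.symm⟩)
        have hiL2 : i ≠ w.length - 2 := by
          rintro rfl
          rcases hleft with h | h
          · omega
          · refine hB ?_
            rw [Bool.and_eq_true, beq_iff_eq, bne_iff_ne]
            constructor
            · rw [show w.length - 1 = w.length - 2 + 1 from by omega]; exact hpair
            · rw [show w.length - 3 = w.length - 2 - 1 from by omega]
              exact fun hh => h hh.symm
        refine ⟨(i : Int), ?_, ?_⟩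
        · rw [PySem.List.mem_pyRange_one]
          simp only [PySem.List.len_eq]
          omega
        · rw [gi i (by omega) (by omega), gi ((i : Int)+1) (by omega) (by omega),
              gi ((i : Int)+2) (by omega) (by omega), gi ((i : Int)-1) (by omega) (by omega)]
          rw [Bool.and_eq_true, Bool.and_eq_true, beq_iff_eq, bne_iff_ne, bne_iff_ne]
          rcases hright with h | h
          · omega
          rcases hleft with h' | h'
          · omega
          refine ⟨⟨?_, ?_⟩, ?_⟩
          · rw [show ((i : Int)+1).toNat = i + 1 from by omega, show ((i : Int)).toNat = i from by omega]
            exact hpair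
          · rw [show ((i : Int)+2).toNat = i + 2 from by omega, show ((i : Int)).toNat = i from by omega]
            exact fun hh => h hh.symm
          · rw [show ((i : Int)-1).toNat = i - 1 from by omega, show ((i : Int)).toNat = i from by omega]
            exact fun hh => h' hh.symm
  · have hL : w.length = 2 := by omega
    rcases w with _ | ⟨a, _ | ⟨b, _ | ⟨c', t⟩⟩⟩
    · simp at hL
    · simp at hL
    · have hab : a ≠ b := by simpa using hne (by simp)
      refine iff_of_false ?_ ?_
      · simp [pvACore, pysem, hab]
      · rintro ⟨i, hlen', hpair, -, -⟩
        simp at hlen'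
        have hi0 : i = 0 := by omega
        subst hi0
        simp at hpair
        exact hab hpair
    · simp at hL

-- ===== VERDICT (by name: the statement is the Claim_ definition above) =====
theorem contains_only_double_digit_spec : Claim_equal_contains_only_double_digit := by
  intro p _ hpre
  unfold Spec_contains_only_double_digit contains_only_double_digit contains_only_double_digit_alt
  rw [Bool.eq_iff_iff, pvHasIso_iff]
  apply pvACore_iff
  · rcases hpre with h | ⟨h, _⟩ <;> omega
  · intro h
    rcases hpre with h3 | ⟨_, hne⟩
    · omega
    · exact hne
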